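-- pv_equiv track=rewrite | github.com/MUDIT-SINGH001/SEARCHING-AND-SORTING | roti prata.py | ismake
-- ===== SOURCE A (Python) =====
-- def ismake(a,mid,p):
--     time=0
--     pt=0
--     for i in range(len(a)):
--         time=a[i]
--         j=2
--         while time<=mid:
--             time+=a[i]*j
--             pt+=1
--             j+=1
--             if pt>=p:
--                 return True
--
--     return False
-- ===== SOURCE B (Python) =====
-- def ismake(a, mid, p):
--     # A cook of rank v finishes his k-th prata at time v + 2v + ... + kv
--     # = v*k*(k+1)/2.  Count per cook the largest such k within mid minutes
--     # (closed form via binary search instead of simulating prata by prata)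
--     # and sum the counts, exiting as soon as the demand p is met.
--     made = 0
--     for v in a:
--         if v <= 0:
--             # non-positive rank: pratas cost no time, so if even the first
--             # one (ready at time v) fits, this cook alone meets any demand
--             if v <= mid:
--                 return True
--         else:
--             # largest k with k*(k+1) <= 2*mid // v, i.e. v*k*(k+1) <= 2*mid
--             m = 2 * mid // v
--             k, hi = 0, m
--             while k < hi:
--                 t = (k + hi + 1) // 2
--                 if t * (t + 1) <= m:
--                     k = t
--                 else:
--                     hi = t - 1
--             made += k
--         if made >= p:
--             return True
--     return False
-- ===== Notes on version B (the rewrite author's own statement) =====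
-- stated objective: faster
-- what changed: Instead of simulating every prata of every cook with a global counter, B computes each cook's prata count in closed form (largest k with v*k*(k+1) <= 2*mid, found by binary search; unbounded for non-positive ranks) and sums the counts with early exit.
-- intended difference: When p <= 0 and the list is nonempty with every rank exceeding mid, A returns False because it only checks the needed count after completing a prata, while B returns True, the intended answer since a non-positive demand needs no pratas. — e.g. on ismake([2], 1, 0): A returns false, B returns true
import Mathlib
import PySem

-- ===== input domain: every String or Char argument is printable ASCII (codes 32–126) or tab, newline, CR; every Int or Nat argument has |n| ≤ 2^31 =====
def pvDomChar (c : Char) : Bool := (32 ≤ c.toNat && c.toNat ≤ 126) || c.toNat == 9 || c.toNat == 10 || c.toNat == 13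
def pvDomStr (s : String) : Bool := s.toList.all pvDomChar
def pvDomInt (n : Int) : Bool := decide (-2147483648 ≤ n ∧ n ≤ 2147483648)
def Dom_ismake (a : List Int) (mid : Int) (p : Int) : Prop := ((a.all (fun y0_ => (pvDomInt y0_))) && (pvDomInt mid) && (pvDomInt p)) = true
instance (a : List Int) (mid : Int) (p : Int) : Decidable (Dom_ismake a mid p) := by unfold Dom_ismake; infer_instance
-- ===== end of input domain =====

-- B replaces A's prata-by-prata simulation with a per-cook closed-form count
-- (largest k with v*k*(k+1) ≤ 2*mid, found by binary search; unbounded for a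
-- non-positive rank), summed with early exit (objective: faster).

-- ===== PORT A =====
-- inner 'while time<=mid' loop of A; 'none' = the 'return True' was taken,
-- 'some pt' = loop fell through with counter pt.  The Nat fuel only makes the
-- recursion structural: pt increases by one per iteration and the loop
-- returns none as soon as pt+1 ≥ p, so (p - pt).toNat + 1 steps always
-- suffice and the fuel-0 branch is never reached from ismakeOuterA.
def ismakeLoopA (v mid p : Int) : Nat → Int → Int → Int → Option Int
  | 0, _, pt, _ => some pt
  | fuel + 1, time, pt, j =>
    if time ≤ mid then
      if pt + 1 ≥ p then none
      else ismakeLoopA v mid p fuel (time + v * j) (pt + 1) (j + 1)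
    else some pt

-- the 'for i in range(len(a))' loop of A, carrying the global counter pt
def ismakeOuterA (mid p : Int) : List Int → Int → Bool
  | [], _ => false
  | v :: rest, pt =>
    match ismakeLoopA v mid p ((p - pt).toNat + 1) v pt 2 with
    | none => true
    | some pt' => ismakeOuterA mid p rest pt'

def ismake (a : List Int) (mid : Int) (p : Int) : Bool :=
  ismakeOuterA mid p a 0

-- ===== PORT B =====
-- Source B's 'while k < hi' binary search: largest k in [k, hi] with k*(k+1) ≤ m
-- (returns the lower end unchanged when hi < k).  The Nat fuel only makes the
-- recursion structural: the interval shrinks each iteration, so m.toNat + 1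
-- steps always suffice from ismakeGoB's call (k = 0, hi = m).
def ismakeBS (m : Int) : Nat → Int → Int → Int
  | 0, k, _ => k
  | fuel + 1, k, hi =>
    if k < hi then
      let t := PySem.Int.floordiv (k + hi + 1) 2
      if t * (t + 1) ≤ m then ismakeBS m fuel t hi else ismakeBS m fuel k (t - 1)
    else k

-- Source B's 'for v in a' loop, carrying the running count 'made'; the trailing
-- 'if made >= p: return True' of the Python loop body is written at the end
-- of each branch that reaches it
def ismakeGoB (mid p : Int) : List Int → Int → Bool
  | [], _ => false
  | v :: rest, made =>
    if v ≤ 0 then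
      if v ≤ mid then true
      else if made ≥ p then true else ismakeGoB mid p rest made
    else
      let m := PySem.Int.floordiv (2 * mid) v
      let k := ismakeBS m (m.toNat + 1) 0 m
      if made + k ≥ p then true else ismakeGoB mid p rest (made + k)

def ismake_alt (a : List Int) (mid : Int) (p : Int) : Bool :=
  ismakeGoB mid p a 0

-- ===== PRECONDITION & SPEC =====
-- When p ≤ 0 and the list is nonempty with every rank exceeding mid, A returns
-- False because it only checks the needed count after completing a prata,
-- while B returns True, the intended answer since a non-positive demand needs
-- no pratas.
def D_ismake (a : List Int) (mid : Int) (p : Int) : Prop :=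
  p ≤ 0 ∧ a ≠ [] ∧ ∀ v ∈ a, mid < v
instance (a : List Int) (mid : Int) (p : Int) : Decidable (D_ismake a mid p) := by unfold D_ismake; infer_instance

def Spec_ismake (a : List Int) (mid : Int) (p : Int) (out : Bool) : Prop := ¬ D_ismake a mid p → out = ismake_alt a mid p
instance (a : List Int) (mid : Int) (p : Int) (out : Bool) : Decidable (Spec_ismake a mid p out) := by unfold Spec_ismake; infer_instance

def pvDiffWitness_ismake : List Int × Int × Int := ([2], 1, 0)
def pvDiffWitnessOut_ismake : Bool × Bool := (false, true)

-- ===== CLAIM (what is proved, stated in full; the proofs are below) =====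
def Claim_unchanged_ismake : Prop := ∀ (a : List Int) (mid : Int) (p : Int), Dom_ismake a mid p → Spec_ismake a mid p (ismake a mid p)
def Claim_changed_ismake : Prop := Dom_ismake (pvDiffWitness_ismake.1) (pvDiffWitness_ismake.2.1) (pvDiffWitness_ismake.2.2) ∧ D_ismake (pvDiffWitness_ismake.1) (pvDiffWitness_ismake.2.1) (pvDiffWitness_ismake.2.2) ∧ ismake (pvDiffWitness_ismake.1) (pvDiffWitness_ismake.2.1) (pvDiffWitness_ismake.2.2) = pvDiffWitnessOut_ismake.1 ∧ ismake_alt (pvDiffWitness_ismake.1) (pvDiffWitness_ismake.2.1) (pvDiffWitness_ismake.2.2) = pvDiffWitnessOut_ismake.2 ∧ pvDiffWitnessOut_ismake.1 ≠ pvDiffWitnessOut_ismake.2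
def Claim_exact_ismake : Prop := ∀ (a : List Int) (mid : Int) (p : Int), Dom_ismake a mid p → D_ismake a mid p → ismake a mid p ≠ ismake_alt a mid p

-- ===== LEMMAS AND PROOFS =====

lemma sq_mono (a b : Int) (h0 : 0 ≤ a) (h : a ≤ b) : a * (a + 1) ≤ b * (b + 1) := by
  nlinarith

-- with a non-positive rank v ≤ mid, A's while-loop never exits normally:
-- it takes 'return True' within the fuel budget
lemma loopA_nonpos (v mid p : Int) (hv : v ≤ 0) :
    ∀ fuel : Nat, ∀ time pt j : Int, (p - pt).toNat < fuel → time ≤ mid → 0 ≤ j →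
      ismakeLoopA v mid p fuel time pt j = none := by
  intro fuel
  induction fuel with
  | zero => intro time pt j hf _ _; omega
  | succ f IH =>
    intro time pt j hf ht hj
    rw [ismakeLoopA, if_pos ht]
    by_cases hr : pt + 1 ≥ p
    · rw [if_pos hr]
    · rw [if_neg hr]
      have hvj : v * j ≤ 0 := mul_nonpos_iff.mpr (Or.inr ⟨hv, hj⟩)
      exact IH _ _ _ (by omega) (by omega) (by omega)

-- binary-search correctness: with enough fuel, ismakeBS returns the largest
-- k in [lo, hi] with k*(k+1) ≤ m
lemma bs_spec (m : Int) : ∀ fuel : Nat, ∀ lo hi : Int, (hi - lo).toNat < fuel →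
    lo ≤ hi → lo * (lo + 1) ≤ m → m < (hi + 1) * (hi + 2) →
    lo ≤ ismakeBS m fuel lo hi ∧ ismakeBS m fuel lo hi ≤ hi ∧
      ismakeBS m fuel lo hi * (ismakeBS m fuel lo hi + 1) ≤ m ∧
      m < (ismakeBS m fuel lo hi + 1) * (ismakeBS m fuel lo hi + 2) := by
  intro fuel
  induction fuel with
  | zero => intro lo hi hf _ _ _; omega
  | succ f IH =>
    intro lo hi hf h1 h2 h3
    rw [ismakeBS]
    by_cases h : lo < hi
    · rw [if_pos h]
      have hk : lo + 1 ≤ PySem.Int.floordiv (lo + hi + 1) 2 ∧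
          PySem.Int.floordiv (lo + hi + 1) 2 ≤ hi := by
        rw [PySem.Int.floordiv_eq_ediv_of_pos (by omega : (0:Int) < 2)]
        omega
      set t := PySem.Int.floordiv (lo + hi + 1) 2 with htdef
      simp only []
      by_cases htp : t * (t + 1) ≤ m
      · rw [if_pos htp]
        have := IH t hi (by omega) (by omega) htp h3
        exact ⟨by omega, this.2.1, this.2.2⟩
      · rw [if_neg htp]
        have h3' : m < ((t - 1) + 1) * ((t - 1) + 2) := by
          have : (t - 1 + 1) * (t - 1 + 2) = t * (t + 1) := by ring
          rw [this]; omega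
        have := IH lo (t - 1) (by omega) (by omega) h2 h3'
        exact ⟨this.1, by omega, this.2.2⟩
    · rw [if_neg h]
      have : lo = hi := le_antisymm h1 (not_lt.mp h)
      subst this
      exact ⟨le_rfl, le_rfl, h2, h3⟩

-- the count B extracts per cook: 0 ≤ K, K*(K+1) ≤ m when K ≥ 1, m < (K+1)*(K+2)
lemma K_spec (m : Int) :
    0 ≤ ismakeBS m (m.toNat + 1) 0 m ∧
    (1 ≤ ismakeBS m (m.toNat + 1) 0 m → ismakeBS m (m.toNat + 1) 0 m * (ismakeBS m (m.toNat + 1) 0 m + 1) ≤ m) ∧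
    m < (ismakeBS m (m.toNat + 1) 0 m + 1) * (ismakeBS m (m.toNat + 1) 0 m + 2) := by
  by_cases hm : 1 ≤ m
  · have h := bs_spec m (m.toNat + 1) 0 m (by omega) (by omega) (by omega) (by nlinarith)
    exact ⟨h.1, fun _ => h.2.2.1, h.2.2.2⟩
  · have : ismakeBS m (m.toNat + 1) 0 m = 0 := by
      rw [ismakeBS, if_neg (by omega : ¬ (0:Int) < m)]
    rw [this]
    exact ⟨le_rfl, fun h => by omega, by omega⟩

-- characterization of A's inner loop for v > 0, where K is the largest k ≥ 0
-- with v*k*(k+1) ≤ 2*mid: the loop makes K+2-j further successful iterations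
lemma loopA_pos (v mid p K : Int) (hv : 0 < v) (hK0 : 0 ≤ K)
    (hKle : 1 ≤ K → v * (K * (K + 1)) ≤ 2 * mid)
    (hKgt : 2 * mid < v * ((K + 1) * (K + 2))) :
    ∀ fuel : Nat, ∀ j pt time : Int, (p - pt).toNat < fuel → 2 ≤ j → j ≤ K + 2 →
      2 * time = v * ((j - 1) * j) → pt < p →
      ismakeLoopA v mid p fuel time pt j =
        if p ≤ pt + (K + 2 - j) then none else some (pt + (K + 2 - j)) := by
  intro fuel
  induction fuel with
  | zero => intro j pt time hf _ _ _ _; omega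
  | succ f IH =>
    intro j pt time hf hj2 hjK htime hptp
    rw [ismakeLoopA]
    by_cases hjle : j ≤ K + 1
    · -- loop body runs: time ≤ mid
      have hmono : (j - 1) * ((j - 1) + 1) ≤ K * (K + 1) :=
        sq_mono (j - 1) K (by omega) (by omega)
      have e1 : (j - 1) * ((j - 1) + 1) = (j - 1) * j := by ring
      rw [e1] at hmono
      have hmul : v * ((j - 1) * j) ≤ v * (K * (K + 1)) :=
        mul_le_mul_of_nonneg_left hmono (by omega)
      have ht : time ≤ mid := by
        have := hKle (by omega)
        linarith
      rw [if_pos ht]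
      by_cases hr : pt + 1 ≥ p
      · rw [if_pos hr, if_pos (by omega)]
      · rw [if_neg hr]
        have htime' : 2 * (time + v * j) = v * (((j + 1) - 1) * (j + 1)) := by
          linear_combination htime
        have := IH (j + 1) (pt + 1) (time + v * j)
          (by omega) (by omega) (by omega) htime' (by omega)
        rw [this]
        have e2 : pt + 1 + (K + 2 - (j + 1)) = pt + (K + 2 - j) := by ring
        rw [e2]
    · -- j = K + 2 : loop exits
      have hj : j = K + 2 := by omega
      subst hj
      have e3 : (K + 2 - 1) * (K + 2) = (K + 1) * (K + 2) := by ring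
      rw [e3] at htime
      have ht : ¬ time ≤ mid := by
        intro h; linarith
      rw [if_neg ht, if_neg (by omega)]
      have : pt + (K + 2 - (K + 2)) = pt := by ring
      rw [this]

-- the outer loops agree on every list when 1 ≤ p, with made = pt
lemma outer_eq (mid p : Int) (hp : 1 ≤ p) :
    ∀ l : List Int, ∀ pt : Int, 0 ≤ pt → pt < p →
      ismakeOuterA mid p l pt = ismakeGoB mid p l pt := by
  intro l
  induction l with
  | nil => intro pt _ _; rfl
  | cons v rest IH =>
    intro pt hpt0 hptp
    by_cases hv0 : v ≤ 0
    · by_cases hvm : v ≤ mid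
      · rw [ismakeOuterA, loopA_nonpos v mid p hv0 _ v pt 2 (by omega) hvm (by omega)]
        rw [ismakeGoB, if_pos hv0, if_pos hvm]
      · rw [ismakeOuterA, ismakeLoopA, if_neg hvm]
        rw [ismakeGoB, if_pos hv0, if_neg hvm, if_neg (by omega : ¬ pt ≥ p)]
        exact IH pt hpt0 hptp
    · have hv : (0:Int) < v := by omega
      set m := PySem.Int.floordiv (2 * mid) v with hmdef
      obtain ⟨hK0, hKle, hKgt⟩ := K_spec m
      set K := ismakeBS m (m.toNat + 1) 0 m with hKdef
      have hKle' : 1 ≤ K → v * (K * (K + 1)) ≤ 2 * mid := by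
        intro h1
        have := (PySem.Int.le_floordiv_iff_mul_le hv
          (q := K * (K + 1)) (a := 2 * mid)).mp (by rw [← hmdef]; exact hKle h1)
        linarith
      have hKgt' : 2 * mid < v * ((K + 1) * (K + 2)) := by
        have := (PySem.Int.floordiv_lt_iff_lt_mul hv
          (q := (K + 1) * (K + 2)) (a := 2 * mid)).mp (by rw [← hmdef]; exact hKgt)
        linarith
      have hloop := loopA_pos v mid p K hv hK0 hKle' hKgt'
        ((p - pt).toNat + 1) 2 pt v (by omega) le_rfl (by omega) (by ring) hptp
      have e4 : pt + (K + 2 - 2) = pt + K := by ring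
      rw [e4] at hloop
      rw [ismakeOuterA, hloop, ismakeGoB, if_neg hv0]
      simp only [← hmdef, ← hKdef]
      by_cases hfin : p ≤ pt + K
      · rw [if_pos hfin, if_pos (by omega : pt + K ≥ p)]
      · rw [if_neg hfin, if_neg (by omega : ¬ pt + K ≥ p)]
        exact IH (pt + K) (by omega) (by omega)

-- when every rank exceeds mid, A's inner loop never runs: A returns false
lemma outerA_allgt (mid p : Int) :
    ∀ l : List Int, (∀ v ∈ l, mid < v) → ∀ pt : Int,
      ismakeOuterA mid p l pt = false := by
  intro l
  induction l with
  | nil => intro _ pt; rfl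
  | cons v rest IH =>
    intro hall pt
    have hv : mid < v := hall v (by simp)
    rw [ismakeOuterA, ismakeLoopA, if_neg (by omega)]
    exact IH (fun w hw => hall w (by simp [hw])) pt

-- when p ≤ 0 and some rank is ≤ mid, A returns true
lemma outerA_nonposp (mid p : Int) (hp : p ≤ 0) :
    ∀ l : List Int, (∃ v ∈ l, v ≤ mid) → ∀ pt : Int, 0 ≤ pt →
      ismakeOuterA mid p l pt = true := by
  intro l
  induction l with
  | nil => intro h pt _; simp at h
  | cons v rest IH =>
    intro hex pt hpt0
    by_cases hv : v ≤ mid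
    · rw [ismakeOuterA, ismakeLoopA, if_pos hv, if_pos (by omega)]
    · rw [ismakeOuterA, ismakeLoopA, if_neg hv]
      obtain ⟨w, hw, hwm⟩ := hex
      rcases List.mem_cons.mp hw with hw | hw
      · omega
      · exact IH ⟨w, hw, hwm⟩ pt hpt0

-- when p ≤ 0, B returns true on any nonempty list
lemma goB_nonposp (mid p : Int) (hp : p ≤ 0) (v : Int) (rest : List Int) :
    ismakeGoB mid p (v :: rest) 0 = true := by
  rw [ismakeGoB]
  by_cases hv0 : v ≤ 0
  · rw [if_pos hv0]
    by_cases hvm : v ≤ mid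
    · rw [if_pos hvm]
    · rw [if_neg hvm, if_pos (by omega : (0:Int) ≥ p)]
  · rw [if_neg hv0]
    obtain ⟨hK0, _, _⟩ := K_spec (PySem.Int.floordiv (2 * mid) v)
    rw [if_pos (by omega)]

-- ===== VERDICT (by name: the statements are the Claim_ definitions above) =====
theorem ismake_spec : Claim_unchanged_ismake := by
  intro a mid p _
  unfold Spec_ismake
  intro hnd
  unfold ismake ismake_alt
  by_cases hp : 1 ≤ p
  · exact outer_eq mid p hp a 0 le_rfl (by omega)
  · unfold D_ismake at hnd
    push_neg at hnd
    match a with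
    | [] => rfl
    | v :: rest =>
      have hex : ∃ w ∈ v :: rest, w ≤ mid := by
        obtain ⟨w, hw, hwm⟩ := hnd (by omega) (by simp)
        exact ⟨w, hw, by omega⟩
      rw [outerA_nonposp mid p (by omega) (v :: rest) hex 0 le_rfl,
        goB_nonposp mid p (by omega) v rest]

theorem ismake_changed : Claim_changed_ismake := by
  unfold Claim_changed_ismake; decide

theorem ismake_tight : Claim_exact_ismake := by
  intro a mid p _ hd
  obtain ⟨hp, hne, hall⟩ := hd
  match a with
  | v :: rest =>
    unfold ismake ismake_alt
    rw [outerA_allgt mid p (v :: rest) hall 0, goB_nonposp mid p hp v rest]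
    simp
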